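-- pv_equiv track=rewrite | github.com/Workwrite-Niidome/voynich-manuscript-analysis | cooccurrence_analysis.py | between_words
-- ===== SOURCE A (Python) =====
-- from collections import Counter, defaultdict
--
-- def between_words(words, w1, w2, max_gap=5):
--     """Find words that appear between w1 and w2."""
--     results = []
--     for i in range(len(words)):
--         if words[i] == w1:
--             for j in range(i+1, min(i+max_gap+1, len(words))):
--                 if words[j] == w2:
--                     results.extend(words[i+1:j])
--                     break
--     return Counter(results)
-- ===== SOURCE B (Python) =====
-- from collections import Counter
--
-- def between_words(words, w1, w2, max_gap=5):
--     """Find words that appear between w1 and w2."""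
--     n = len(words)
--     # one backward pass: nxt[i] = smallest index j > i with words[j] == w2, else None
--     nxt = [None] * n
--     following = None
--     for i in range(n - 1, -1, -1):
--         nxt[i] = following
--         if words[i] == w2:
--             following = i
--     results = []
--     for i in range(n):
--         if words[i] == w1:
--             p = nxt[i]
--             if p is not None and p <= i + max_gap:
--                 results.extend(words[i + 1:p])
--     return Counter(results)
-- ===== Notes on version B (the rewrite author's own statement) =====
-- stated objective: alternative
-- what changed: Replaces A's bounded forward rescan after every w1-occurrence by a single backward pass that precomputes, for each position, the index of the next w2-occurrence, which is then looked up and checked against the gap bound in one forward pass.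
import Mathlib
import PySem

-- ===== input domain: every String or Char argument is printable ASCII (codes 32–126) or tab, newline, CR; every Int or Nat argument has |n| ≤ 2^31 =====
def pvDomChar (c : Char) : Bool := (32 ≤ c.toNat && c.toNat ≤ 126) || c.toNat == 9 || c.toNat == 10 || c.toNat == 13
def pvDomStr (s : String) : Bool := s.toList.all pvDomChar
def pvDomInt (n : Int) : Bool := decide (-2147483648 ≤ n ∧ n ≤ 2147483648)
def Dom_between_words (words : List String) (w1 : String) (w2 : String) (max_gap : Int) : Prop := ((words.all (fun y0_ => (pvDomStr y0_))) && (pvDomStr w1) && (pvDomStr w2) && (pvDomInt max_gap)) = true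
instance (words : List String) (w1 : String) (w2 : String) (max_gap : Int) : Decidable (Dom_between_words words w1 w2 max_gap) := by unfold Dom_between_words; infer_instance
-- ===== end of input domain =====

-- B replaces A's bounded forward rescan at every w1-position by a single backward pass
-- precomputing, for each index, the next w2-occurrence (objective: alternative single-pass index).

-- ===== PORT A =====
-- A's inner 'for j in range(i+1, stop): if words[j]==w2: results.extend(words[i+1:j]); break'
def bwInner (words : List String) (w2 : String) (results : List String) (j stop i : Int) : List String :=
  if _h : j < stop then
    if PySem.List.pyGetD words j "" == w2 then
      results ++ PySem.List.slice words (some (i + 1)) (some j)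
    else bwInner words w2 results (j + 1) stop i
  else results
termination_by (stop - j).toNat
decreasing_by omega

def between_words (words : List String) (w1 : String) (w2 : String) (max_gap : Int) : List (String × Int) :=
  let n : Int := words.length
  let results := (PySem.List.pyRange 0 n 1).foldl (fun results i =>
    if PySem.List.pyGetD words i "" == w1 then
      bwInner words w2 results (i + 1) (min (i + max_gap + 1) n) i
    else results) []
  (PySem.Dict.counter results).items

-- ===== PORT B =====
-- B's backward pass: nxt[i] = following, then 'if words[i]==w2: following = i'
def bwState (words : List String) (w2 : String) (s : Int) : List (Option Int) × Option Int :=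
  (PySem.List.enumerate words s).foldr
    (fun p st => (st.2 :: st.1, if p.2 == w2 then some p.1 else st.2)) ([], none)

def between_words_alt (words : List String) (w1 : String) (w2 : String) (max_gap : Int) : List (String × Int) :=
  let n : Int := words.length
  let nxt := (bwState words w2 0).1
  let results := (PySem.List.pyRange 0 n 1).foldl (fun results i =>
    if PySem.List.pyGetD words i "" == w1 then
      match PySem.List.pyGetD nxt i none with
      | some p => if p ≤ i + max_gap then results ++ PySem.List.slice words (some (i + 1)) (some p) else results
      | none => results
    else results) []
  (PySem.Dict.counter results).items

-- ===== PRECONDITION & SPEC =====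
def Spec_between_words (words : List String) (w1 : String) (w2 : String) (max_gap : Int) (out : List (String × Int)) : Prop := out = between_words_alt words w1 w2 max_gap
instance (words : List String) (w1 : String) (w2 : String) (max_gap : Int) (out : List (String × Int)) : Decidable (Spec_between_words words w1 w2 max_gap out) := by unfold Spec_between_words; infer_instance

-- ===== CLAIM (what is proved, stated in full; the proofs are below) =====
def Claim_equal_between_words : Prop := ∀ (words : List String) (w1 : String) (w2 : String) (max_gap : Int), Dom_between_words words w1 w2 max_gap → Spec_between_words words w1 w2 max_gap (between_words words w1 w2 max_gap)

-- ===== LEMMAS AND PROOFS =====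

-- A's inner scan equals: find the first index in [j, stop) holding w2, then extend once.
theorem bwInner_eq_find (words : List String) (w2 : String) (results : List String)
    (j stop i : Int) :
    bwInner words w2 results j stop i =
      match (PySem.List.pyRange j stop 1).find? (fun t => PySem.List.pyGetD words t "" == w2) with
      | some p => results ++ PySem.List.slice words (some (i + 1)) (some p)
      | none => results := by
  by_cases h : j < stop
  · rw [PySem.List.pyRange_one_cons h, List.find?_cons]
    unfold bwInner
    by_cases hw : PySem.List.pyGetD words j "" == w2
    · simp [h, hw]
    · simp only [h, dite_true, hw, if_false, Bool.false_eq_true]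
      exact bwInner_eq_find words w2 results (j + 1) stop i
  · unfold bwInner
    rw [PySem.List.pyRange_one_eq_nil (by omega)]
    simp [h]
termination_by (stop - j).toNat
decreasing_by omega

theorem find?_pyRange_mem {P : Int → Bool} {a b p : Int}
    (h : (PySem.List.pyRange a b 1).find? P = some p) : a ≤ p ∧ p < b := by
  have := List.mem_of_find?_eq_some h
  rwa [PySem.List.mem_pyRange_one] at this

-- truncating the scan at stop = min (i+max_gap+1) n equals filtering the global first occurrence by the gap bound
theorem find?_trunc (words : List String) (w2 : String) (i max_gap : Int) (_hi : 0 ≤ i) :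
    (PySem.List.pyRange (i + 1) (min (i + max_gap + 1) (words.length : Int)) 1).find?
        (fun t => PySem.List.pyGetD words t "" == w2) =
      match (PySem.List.pyRange (i + 1) (words.length : Int) 1).find?
          (fun t => PySem.List.pyGetD words t "" == w2) with
      | some p => if p ≤ i + max_gap then some p else none
      | none => none := by
  set n : Int := (words.length : Int) with hn
  set P : Int → Bool := fun t => PySem.List.pyGetD words t "" == w2 with hP
  by_cases hst : min (i + max_gap + 1) n ≤ i + 1
  · rw [PySem.List.pyRange_one_eq_nil hst]
    simp only [List.find?_nil]
    cases hfind : (PySem.List.pyRange (i + 1) n 1).find? P with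
    | none => rfl
    | some p =>
      have hm := find?_pyRange_mem hfind
      have : ¬ p ≤ i + max_gap := by omega
      simp [this]
  · have hsplit : PySem.List.pyRange (i + 1) n 1 =
        PySem.List.pyRange (i + 1) (min (i + max_gap + 1) n) 1 ++
        PySem.List.pyRange (min (i + max_gap + 1) n) n 1 :=
      PySem.List.pyRange_one_append _ _ _ (by omega) (by omega)
    rw [hsplit, List.find?_append]
    cases hfind : (PySem.List.pyRange (i + 1) (min (i + max_gap + 1) n) 1).find? P with
    | some p =>
      have hm := find?_pyRange_mem hfind
      have : p ≤ i + max_gap := by omega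
      simp [this]
    | none =>
      simp only [Option.none_or]
      cases hfind2 : (PySem.List.pyRange (min (i + max_gap + 1) n) n 1).find? P with
      | none => rfl
      | some p =>
        have hm := find?_pyRange_mem hfind2
        have : ¬ p ≤ i + max_gap := by omega
        simp [this]

-- bridge: the range-based first occurrence is the enumerate-based one on the dropped suffix
theorem find?_pyRange_eq_enumerate (words : List String) (w2 : String) (a : Nat)
    (ha : a ≤ words.length) :
    (PySem.List.pyRange (a : Int) (words.length : Int) 1).find?
        (fun t => PySem.List.pyGetD words t "" == w2) =
      ((PySem.List.enumerate (words.drop a) (a : Int)).find? (fun p => p.2 == w2)).map (·.1) := by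
  by_cases h : a < words.length
  · have hcons : words.drop a = words[a] :: words.drop (a + 1) :=
      (List.drop_eq_getElem_cons h)
    rw [hcons, PySem.List.pyRange_one_cons (by exact_mod_cast h), PySem.List.enumerate_cons,
      List.find?_cons, List.find?_cons]
    have hget : PySem.List.pyGetD words (a : Int) "" = words[a] := by
      rw [PySem.List.pyGetD_natCast]
      simp [List.getD_eq_getElem?_getD, h]
    rw [hget]
    by_cases hw : words[a] == w2
    · simp [hw]
    · simp only [hw, Bool.false_eq_true, if_false]
      have := find?_pyRange_eq_enumerate words w2 (a + 1) (by omega)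
      rw [show ((a : Int) + 1) = ((a + 1 : Nat) : Int) by push_cast; ring]
      exact this
  · have hae : a = words.length := by omega
    subst hae
    rw [PySem.List.pyRange_one_eq_nil (by omega)]
    simp [List.drop_length, PySem.List.enumerate_nil]
termination_by words.length - a

-- the backward pass: characterise the final state of B's foldr
theorem bwState_spec (words : List String) (w2 : String) (s : Int) :
    (bwState words w2 s).2 = ((PySem.List.enumerate words s).find? (fun p => p.2 == w2)).map (·.1) ∧
    (bwState words w2 s).1.length = words.length ∧
    ∀ k : Nat, k < words.length →
      (bwState words w2 s).1[k]? =
        some (((PySem.List.enumerate (words.drop (k + 1)) (s + k + 1)).find? (fun p => p.2 == w2)).map (·.1)) := by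
  induction words generalizing s with
  | nil => simp [bwState, PySem.List.enumerate_nil]
  | cons w ws ih =>
    have hstate : bwState (w :: ws) w2 s =
        ((bwState ws w2 (s + 1)).2 :: (bwState ws w2 (s + 1)).1,
         if w == w2 then some s else (bwState ws w2 (s + 1)).2) := by
      simp [bwState, PySem.List.enumerate_cons]
    obtain ⟨ih2, ihlen, ihget⟩ := ih (s + 1)
    refine ⟨?_, ?_, ?_⟩
    · rw [hstate, PySem.List.enumerate_cons, List.find?_cons]
      by_cases hw : w == w2
      · simp [hw]
      · simp only [hw, Bool.false_eq_true, if_false]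
        exact ih2
    · rw [hstate]; simp [ihlen]
    · intro k hk
      rw [hstate]
      cases k with
      | zero =>
        simp only [List.getElem?_cons_zero, List.drop_succ_cons, List.drop_zero]
        rw [ih2]
        norm_num
      | succ m =>
        simp only [List.getElem?_cons_succ, List.drop_succ_cons]
        rw [ihget m (by simpa using hk)]
        have harg : s + 1 + (m : Int) + 1 = s + ((m + 1 : Nat) : Int) + 1 := by push_cast; ring
        rw [harg]

-- ===== VERDICT (by name: the statement is the Claim_ definition above) =====
theorem between_words_spec : Claim_equal_between_words := by
  intro words w1 w2 max_gap _hdom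
  unfold Spec_between_words between_words between_words_alt
  dsimp only
  congr 2
  apply PySem.List.foldl_congr_mem
  intro acc i hi
  rw [PySem.List.mem_pyRange_one] at hi
  by_cases hw1 : PySem.List.pyGetD words i "" == w1
  · simp only [hw1, if_true]
    -- A side: inner scan = truncated find = bounded global find
    rw [bwInner_eq_find, find?_trunc words w2 i max_gap hi.1]
    -- B side: nxt[i] = global find
    obtain ⟨_, hlen, hget⟩ := bwState_spec words w2 0
    have hk : i.toNat < words.length := by omega
    have hB : PySem.List.pyGetD (bwState words w2 0).1 i none =
        ((PySem.List.enumerate (words.drop (i.toNat + 1)) ((i.toNat : Int) + 1)).find?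
          (fun p => p.2 == w2)).map (·.1) := by
      rw [PySem.List.pyGetD_eq_getElem _ none hi.1 (by omega)]
      have := hget i.toNat hk
      rw [List.getElem?_eq_getElem (by omega)] at this
      have h2 := Option.some.inj this
      rw [h2]
      norm_num
    have hit : ((i.toNat : Int) + 1) = i + 1 := by omega
    rw [hit] at hB
    have hbridge := find?_pyRange_eq_enumerate words w2 (i.toNat + 1) (by omega)
    have hcast : ((i.toNat + 1 : Nat) : Int) = i + 1 := by omega
    rw [hcast] at hbridge
    rw [hB, ← hbridge]
    cases (PySem.List.pyRange (i + 1) (words.length : Int) 1).find?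
        (fun t => PySem.List.pyGetD words t "" == w2) with
    | none => rfl
    | some p => by_cases hp : p ≤ i + max_gap <;> simp [hp]
  · simp [hw1]
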